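-- pv_equiv track=rewrite | github.com/nkarl/learn.algorithms | practice/LeetCode/Easy/2441. Largest Positive Integer That Exists With Its Negative.py | func
-- ===== SOURCE A (Python) =====
-- def func(nums):
--     s = {}
--     maxi = -1
--     for n in nums:
--         if -n not in s:
--             s[n] = 0
--         else:
--             maxi = max(maxi, abs(n))
--     return -1 if maxi == -1 else maxi
-- ===== SOURCE B (Python) =====
-- def func(nums):
--     arr = sorted(nums)
--     left, right = 0, len(arr) - 1
--     while left < right:
--         s = arr[left] + arr[right]
--         if s == 0:
--             return arr[right]
--         if s > 0:
--             right -= 1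
--         else:
--             left += 1
--     return -1
-- ===== Notes on version B (the rewrite author's own statement) =====
-- stated objective: alternative
-- what changed: Replaces A's one-pass dict-of-seen-values scan with sort-then-two-pointers on a sorted copy: the hash set and the running max disappear, the answer is the right pointer's value at the first zero-sum pair.
import Mathlib
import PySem

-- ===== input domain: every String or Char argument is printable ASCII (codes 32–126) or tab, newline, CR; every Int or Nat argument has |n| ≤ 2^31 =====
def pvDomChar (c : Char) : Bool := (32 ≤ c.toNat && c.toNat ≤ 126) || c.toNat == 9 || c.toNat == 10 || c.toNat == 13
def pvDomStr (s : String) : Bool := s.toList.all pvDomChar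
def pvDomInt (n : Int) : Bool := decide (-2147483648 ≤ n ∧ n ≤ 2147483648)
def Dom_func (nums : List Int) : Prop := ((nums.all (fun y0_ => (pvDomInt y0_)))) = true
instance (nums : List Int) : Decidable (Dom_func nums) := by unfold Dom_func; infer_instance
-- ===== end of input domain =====

-- B replaces A's dict-of-seen-values single pass with sort + two pointers (a genuinely different
-- algorithm of similar cost); neither version mutates its argument (B sorts a copy).

-- ===== PORT A =====
-- loop body of A: 'if -n not in s: s[n] = 0 else: maxi = max(maxi, abs(n))'
def AStep (st : PySem.Dict Int Int × Int) (n : Int) : PySem.Dict Int Int × Int :=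
  if st.1.contains (-n) = false then (st.1.insert n 0, st.2)
  else (st.1, max st.2 |n|)

-- A: dict s = {}, maxi = -1, the loop above over nums, then 'return -1 if maxi == -1 else maxi'
def func (nums : List Int) : Int :=
  let st := nums.foldl AStep (PySem.Dict.empty, -1)
  if st.2 = -1 then -1 else st.2

-- ===== PORT B =====
-- the while-loop of Source B (left/right two pointers on the sorted copy); right - left shrinks
def funcAltLoop (arr : List Int) (left right : Nat) : Int :=
  if h : left < right then
    let s := arr.getD left 0 + arr.getD right 0
    if s = 0 then arr.getD right 0
    else if s > 0 then funcAltLoop arr left (right - 1)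
    else funcAltLoop arr (left + 1) right
  else -1
termination_by right - left
decreasing_by all_goals omega

-- B: arr = sorted(nums); two pointers from both ends
def func_alt (nums : List Int) : Int :=
  let arr := PySem.List.sorted nums (fun x => x) false
  funcAltLoop arr 0 (arr.length - 1)

-- ===== PRECONDITION & SPEC =====
def Spec_func (nums : List Int) (out : Int) : Prop := out = func_alt nums
instance (nums : List Int) (out : Int) : Decidable (Spec_func nums out) := by unfold Spec_func; infer_instance

-- ===== CLAIM (what is proved, stated in full; the proofs are below) =====
def Claim_equal_func : Prop := ∀ (nums : List Int), Dom_func nums → Spec_func nums (func nums)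

-- ===== LEMMAS AND PROOFS =====

-- 'k is a valid answer for list l': k ≥ 0 and both k and -k occur (two occurrences when k = 0)
def GoodPair (l : List Int) (k : Int) : Prop :=
  0 ≤ k ∧ ((k ≠ 0 ∧ k ∈ l ∧ -k ∈ l) ∨ (k = 0 ∧ 2 ≤ l.count 0))

-- both ports return the greatest GoodPair value, or -1 when none exists
def Ans (l : List Int) (v : Int) : Prop :=
  (v = -1 ∧ ∀ k, ¬ GoodPair l k) ∨ (GoodPair l v ∧ ∀ k, GoodPair l k → k ≤ v)

theorem ans_unique (l : List Int) (a b : Int) (ha : Ans l a) (hb : Ans l b) : a = b := by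
  rcases ha with ⟨ha1, ha2⟩ | ⟨ha1, ha2⟩ <;> rcases hb with ⟨hb1, hb2⟩ | ⟨hb1, hb2⟩
  · omega
  · exact absurd hb1 (ha2 b)
  · exact absurd ha1 (hb2 a)
  · exact le_antisymm (hb2 a ha1) (ha2 b hb1)

theorem mem_iff_getD (l : List Int) (x : Int) :
    x ∈ l ↔ ∃ i : Nat, i < l.length ∧ l.getD i 0 = x := by
  rw [List.mem_iff_getElem]
  constructor
  · rintro ⟨i, hi, hx⟩; exact ⟨i, hi, by rw [List.getD_eq_getElem _ _ hi]; exact hx⟩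
  · rintro ⟨i, hi, hx⟩; exact ⟨i, hi, by rw [List.getD_eq_getElem _ _ hi] at hx; exact hx⟩

theorem two_le_count_iff (l : List Int) (x : Int) :
    2 ≤ l.count x ↔ ∃ i j : Nat, i < j ∧ j < l.length ∧ l.getD i 0 = x ∧ l.getD j 0 = x := by
  induction l with
  | nil => simp
  | cons a t ih =>
    constructor
    · intro h
      simp only [List.count_cons, beq_iff_eq] at h
      by_cases ha : a = x
      · have h1 : 1 ≤ t.count x ∨ 2 ≤ t.count x := by rw [if_pos ha] at h; omega
        rcases h1 with h1 | h1
        · have hx : x ∈ t := by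
            have := List.count_pos_iff.mp (by omega : 0 < t.count x); exact this
          obtain ⟨j, hj, hjx⟩ := (mem_iff_getD t x).mp hx
          exact ⟨0, j + 1, by omega, by simp only [List.length_cons]; omega, by simpa using ha, by simpa using hjx⟩
        · obtain ⟨i, j, hij, hj, hi0, hj0⟩ := ih.mp h1
          exact ⟨i + 1, j + 1, by omega, by simp only [List.length_cons]; omega, by simpa using hi0, by simpa using hj0⟩
      · have h2 : 2 ≤ t.count x := by rw [if_neg ha] at h; omega
        obtain ⟨i, j, hij, hj, hi0, hj0⟩ := ih.mp h2
        exact ⟨i + 1, j + 1, by omega, by simp only [List.length_cons]; omega, by simpa using hi0, by simpa using hj0⟩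
    · rintro ⟨i, j, hij, hj, hi0, hj0⟩
      rw [List.count_cons]
      match i, j with
      | 0, j + 1 =>
        simp only [List.getD_cons_zero] at hi0
        simp only [List.getD_cons_succ] at hj0
        simp only [List.length_cons] at hj
        have : x ∈ t := (mem_iff_getD t x).mpr ⟨j, by omega, hj0⟩
        have := List.count_pos_iff.mpr this
        simp [hi0]; omega
      | i + 1, j + 1 =>
        simp only [List.getD_cons_succ] at hi0 hj0
        simp only [List.length_cons] at hj
        have := ih.mpr ⟨i, j, by omega, by omega, hi0, hj0⟩
        omega

-- B-side: any zero-sum pair inside the window bounds the loop's result from below (maximality)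
theorem loop_le (arr : List Int)
    (hm : ∀ p q : Nat, p ≤ q → q < arr.length → arr.getD p 0 ≤ arr.getD q 0)
    (l r : Nat) (hr : r < arr.length) :
    ∀ i j : Nat, l ≤ i → i < j → j ≤ r → arr.getD i 0 + arr.getD j 0 = 0 →
      arr.getD j 0 ≤ funcAltLoop arr l r := by
  fun_induction funcAltLoop arr l r with
  | case1 l r hlr s hs =>
    intro i j hli hij hjr hsum
    exact hm j r (by omega) hr
  | case2 l r hlr s hs0 hspos ih =>
    intro i j hli hij hjr hsum
    have hjr' : j ≠ r := by
      intro he; subst he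
      have h1 : arr.getD l 0 ≤ arr.getD i 0 := hm l i hli (by omega)
      simp only [s] at hspos; omega
    exact ih (by omega) i j hli hij (by omega) hsum
  | case3 l r hlr s hs0 hsneg ih =>
    intro i j hli hij hjr hsum
    have hil : i ≠ l := by
      intro he; subst he
      have h1 : arr.getD j 0 ≤ arr.getD r 0 := hm j r hjr hr
      simp only [s, not_lt] at hsneg; omega
    exact ih hr i j (by omega) hij hjr hsum
  | case4 l r hlr =>
    intro i j hli hij hjr hsum; omega

-- B-side: the loop returns -1 or the right element of a zero-sum pair in the window (soundness)
theorem loop_sound (arr : List Int) (l r : Nat) :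
    funcAltLoop arr l r = -1 ∨
      ∃ i j : Nat, l ≤ i ∧ i < j ∧ j ≤ r ∧ arr.getD i 0 + arr.getD j 0 = 0 ∧
        funcAltLoop arr l r = arr.getD j 0 := by
  fun_induction funcAltLoop arr l r with
  | case1 l r hlr s hs =>
    right; exact ⟨l, r, le_refl l, hlr, le_refl r, hs, rfl⟩
  | case2 l r hlr s hs0 hspos ih =>
    rcases ih with h | ⟨i, j, h1, h2, h3, h4, h5⟩
    · left; exact h
    · right; exact ⟨i, j, h1, h2, by omega, h4, h5⟩
  | case3 l r hlr s hs0 hsneg ih =>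
    rcases ih with h | ⟨i, j, h1, h2, h3, h4, h5⟩
    · left; exact h
    · right; exact ⟨i, j, by omega, h2, h3, h4, h5⟩
  | case4 l r hlr => left; rfl

-- on a sorted list, GoodPair is exactly 'a zero-sum index pair i < j with value k on the right'
theorem good_iff_pair (arr : List Int)
    (hm : ∀ p q : Nat, p ≤ q → q < arr.length → arr.getD p 0 ≤ arr.getD q 0) (k : Int) :
    GoodPair arr k ↔
      ∃ i j : Nat, i < j ∧ j < arr.length ∧ arr.getD i 0 = -k ∧ arr.getD j 0 = k := by
  constructor
  · rintro ⟨hk, ⟨hne, hmem, hnmem⟩ | ⟨hk0, hcnt⟩⟩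
    · obtain ⟨j, hj, hjv⟩ := (mem_iff_getD arr k).mp hmem
      obtain ⟨i, hi, hiv⟩ := (mem_iff_getD arr (-k)).mp hnmem
      have hkpos : 0 < k := lt_of_le_of_ne hk (Ne.symm hne)
      rcases Nat.lt_trichotomy i j with h | h | h
      · exact ⟨i, j, h, hj, hiv, hjv⟩
      · exfalso; subst h; rw [hiv] at hjv; omega
      · exfalso; have := hm j i (by omega) hi; rw [hiv, hjv] at this; omega
    · subst hk0
      obtain ⟨i, j, hij, hj, hi0, hj0⟩ := (two_le_count_iff arr 0).mp hcnt
      exact ⟨i, j, hij, hj, by rw [hi0]; ring, hj0⟩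
  · rintro ⟨i, j, hij, hj, hiv, hjv⟩
    have hle : arr.getD i 0 ≤ arr.getD j 0 := hm i j (by omega) hj
    have hk : 0 ≤ k := by rw [hiv, hjv] at hle; omega
    refine ⟨hk, ?_⟩
    by_cases hk0 : k = 0
    · exact Or.inr ⟨hk0, (two_le_count_iff arr 0).mpr
        ⟨i, j, hij, hj, by rw [hiv, hk0]; ring, by rw [hjv, hk0]⟩⟩
    · exact Or.inl ⟨hk0, (mem_iff_getD arr k).mpr ⟨j, hj, hjv⟩,
        (mem_iff_getD arr (-k)).mpr ⟨i, by omega, hiv⟩⟩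

theorem good_append (p l : List Int) (k : Int) (h : GoodPair p k) : GoodPair (p ++ l) k := by
  obtain ⟨hk, ⟨hne, h1, h2⟩ | ⟨hk0, hcnt⟩⟩ := h
  · exact ⟨hk, Or.inl ⟨hne, List.mem_append_left l h1, List.mem_append_left l h2⟩⟩
  · exact ⟨hk, Or.inr ⟨hk0, by rw [List.count_append]; omega⟩⟩

-- decomposition of GoodPair on p ++ [n]

-- decomposition of GoodPair on p ++ [n]
theorem good_snoc (p : List Int) (n k : Int) (h : GoodPair (p ++ [n]) k) :
    GoodPair p k ∨ (k = |n| ∧ -n ∈ p) := by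
  obtain ⟨hk, ⟨hne, h1, h2⟩ | ⟨hk0, hcnt⟩⟩ := h
  · rw [List.mem_append, List.mem_singleton] at h1 h2
    rcases h1 with h1 | h1 <;> rcases h2 with h2 | h2
    · exact Or.inl ⟨hk, Or.inl ⟨hne, h1, h2⟩⟩
    · -- k ∈ p, -k = n
      refine Or.inr ⟨by rw [← h2, abs_neg, abs_of_nonneg hk], ?_⟩
      rw [← h2, neg_neg]; exact h1
    · -- k = n, -k ∈ p
      refine Or.inr ⟨by rw [← h1, abs_of_nonneg hk], ?_⟩
      rw [← h1]; exact h2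
    · exfalso; omega
  · rw [List.count_append, List.count_singleton'] at hcnt
    by_cases hcp : 2 ≤ p.count 0
    · exact Or.inl ⟨hk, Or.inr ⟨hk0, hcp⟩⟩
    · by_cases hn : n = 0
      · subst hn
        rw [if_pos (by simp)] at hcnt
        refine Or.inr ⟨by rw [hk0]; simp, ?_⟩
        simpa using List.count_pos_iff.mp (show 0 < p.count 0 by omega)
      · exfalso
        rw [if_neg (by simpa using fun hc => hn hc)] at hcnt
        omega

-- A-side loop invariant: keys of s occur in the prefix; every prefix element is in s or bounded by
-- maxi; maxi is -1 or a GoodPair value; maxi bounds every GoodPair value of the prefix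
def AInv (p : List Int) (s : PySem.Dict Int Int) (m : Int) : Prop :=
  (∀ k : Int, s.contains k = true → k ∈ p) ∧
  (∀ k ∈ p, s.contains k = true ∨ |k| ≤ m) ∧
  (m = -1 ∨ GoodPair p m) ∧
  (∀ k : Int, GoodPair p k → k ≤ m)

theorem astep_inv (p : List Int) (s : PySem.Dict Int Int) (m n : Int) (h : AInv p s m) :
    AInv (p ++ [n]) (AStep (s, m) n).1 (AStep (s, m) n).2 := by
  obtain ⟨h1, h2, h3, h4⟩ := h
  unfold AStep
  by_cases hc : s.contains (-n) = false
  · rw [if_pos hc]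
    refine ⟨?_, ?_, ?_, ?_⟩
    · intro k hk
      simp only [PySem.Dict.contains_insert, Bool.or_eq_true, beq_iff_eq] at hk
      rcases hk with hk | hk
      · subst hk; exact List.mem_append_right p (List.mem_singleton.mpr rfl)
      · exact List.mem_append_left _ (h1 k hk)
    · intro k hkmem
      rcases List.mem_append.mp hkmem with hk | hk
      · rcases h2 k hk with hcon | hle
        · left; simp only [PySem.Dict.contains_insert, Bool.or_eq_true]; right; exact hcon
        · right; exact hle
      · left; rw [List.mem_singleton.mp hk]; exact PySem.Dict.contains_insert_self s n 0
    · rcases h3 with h3 | h3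
      · exact Or.inl h3
      · exact Or.inr (good_append p [n] m h3)
    · intro k hg
      rcases good_snoc p n k hg with hgp | ⟨hkn, hnp⟩
      · exact h4 k hgp
      · rcases h2 (-n) hnp with hcon | habs
        · rw [hcon] at hc; exact absurd hc (by simp)
        · rw [hkn]; rw [abs_neg] at habs; exact habs
  · rw [if_neg hc]
    have hcon : s.contains (-n) = true := by
      revert hc; cases s.contains (-n) <;> simp
    have hnp : -n ∈ p := h1 (-n) hcon
    have hgood : GoodPair (p ++ [n]) |n| := by
      refine ⟨abs_nonneg n, ?_⟩
      by_cases hn : n = 0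
      · subst hn
        refine Or.inr ⟨by simp, ?_⟩
        rw [List.count_append, List.count_singleton']
        have : 0 < p.count 0 := List.count_pos_iff.mpr (by simpa using hnp)
        split <;> omega
      · refine Or.inl ⟨by simpa using hn, ?_, ?_⟩
        · rcases abs_cases n with ⟨he, _⟩ | ⟨he, _⟩
          · rw [he]; exact List.mem_append_right p (List.mem_singleton.mpr rfl)
          · rw [he]; exact List.mem_append_left _ hnp
        · rcases abs_cases n with ⟨he, _⟩ | ⟨he, _⟩
          · rw [he]; exact List.mem_append_left _ hnp
          · rw [he, neg_neg]; exact List.mem_append_right p (List.mem_singleton.mpr rfl)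
    refine ⟨?_, ?_, ?_, ?_⟩
    · intro k hk; exact List.mem_append_left _ (h1 k hk)
    · intro k hkmem
      rcases List.mem_append.mp hkmem with hk | hk
      · rcases h2 k hk with hcon' | hle
        · left; exact hcon'
        · right; exact le_trans hle (le_max_left m |n|)
      · right; rw [List.mem_singleton.mp hk]; exact le_max_right m |n|
    · right
      rcases le_total m |n| with hle | hle
      · rw [max_eq_right hle]; exact hgood
      · rw [max_eq_left hle]
        rcases h3 with h3 | h3
        · exfalso; have := abs_nonneg n; omega
        · exact good_append p [n] m h3
    · intro k hg
      rcases good_snoc p n k hg with hgp | ⟨hkn, _⟩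
      · exact le_trans (h4 k hgp) (le_max_left m |n|)
      · rw [hkn]; exact le_max_right m |n|

theorem afold (l : List Int) : ∀ (p : List Int) (s : PySem.Dict Int Int) (m : Int),
    AInv p s m → AInv (p ++ l) (l.foldl AStep (s, m)).1 (l.foldl AStep (s, m)).2 := by
  induction l with
  | nil => intro p s m h; simpa using h
  | cons n t ih =>
    intro p s m h
    have h' := astep_inv p s m n h
    have h'' := ih (p ++ [n]) (AStep (s, m) n).1 (AStep (s, m) n).2 h'
    simpa [List.foldl_cons, List.append_assoc] using h''

theorem ainv_nil : AInv [] PySem.Dict.empty (-1) := by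
  refine ⟨?_, ?_, Or.inl rfl, ?_⟩
  · intro k hk; rw [PySem.Dict.contains_empty] at hk; exact absurd hk (by simp)
  · intro k hk; exact absurd hk (List.not_mem_nil)
  · intro k hg
    obtain ⟨hk, ⟨_, h, _⟩ | ⟨_, hcnt⟩⟩ := hg
    · exact absurd h (List.not_mem_nil)
    · simp at hcnt

theorem func_ans (nums : List Int) : Ans nums (func nums) := by
  have h := afold nums [] PySem.Dict.empty (-1) ainv_nil
  rw [List.nil_append] at h
  obtain ⟨_, _, h3, h4⟩ := h
  unfold func Ans
  by_cases hm : (nums.foldl AStep (PySem.Dict.empty, -1)).2 = -1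
  · rw [if_pos hm]
    left
    refine ⟨rfl, fun k hg => ?_⟩
    have hk := (h4 k hg)
    rw [hm] at hk
    have := hg.1
    omega
  · rw [if_neg hm]
    right
    rcases h3 with h3 | h3
    · exact absurd h3 hm
    · exact ⟨h3, h4⟩

theorem func_alt_ans (nums : List Int) : Ans nums (func_alt nums) := by
  unfold func_alt
  have hperm : (PySem.List.sorted nums (fun x => x) false).Perm nums :=
    PySem.List.sorted_perm nums (fun x => x) false
  set arr := PySem.List.sorted nums (fun x => x) false with harr
  have hm : ∀ p q : Nat, p ≤ q → q < arr.length → arr.getD p 0 ≤ arr.getD q 0 := by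
    intro p q hpq hq
    rw [List.getD_eq_getElem _ _ (lt_of_le_of_lt hpq hq), List.getD_eq_getElem _ _ hq]
    exact PySem.List.sorted_id_getElem_mono nums hpq (by rw [← harr]; exact hq)
  have hgood : ∀ k, GoodPair arr k ↔ GoodPair nums k := by
    intro k
    unfold GoodPair
    rw [hperm.mem_iff, hperm.mem_iff, hperm.count_eq]
  by_cases hnil : arr = []
  · have hnums : nums = [] := (PySem.List.sorted_eq_nil_iff nums (fun x => x) false).mp (by rw [← harr]; exact hnil)
    rw [hnil]
    left
    refine ⟨by rw [funcAltLoop]; simp, fun k hg => ?_⟩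
    obtain ⟨hk, ⟨_, hmem, _⟩ | ⟨_, hcnt⟩⟩ := hg
    · rw [hnums] at hmem; exact absurd hmem (List.not_mem_nil)
    · rw [hnums] at hcnt; simp at hcnt
  · have hlen : 0 < arr.length := List.length_pos_iff.mpr hnil
    rcases loop_sound arr 0 (arr.length - 1) with h | ⟨i, j, _, h2, h3, h4, h5⟩
    · rw [h]
      left
      refine ⟨rfl, fun k hg => ?_⟩
      obtain ⟨i, j, hij, hj, hiv, hjv⟩ := (good_iff_pair arr hm k).mp ((hgood k).mpr hg)
      have hle := loop_le arr hm 0 (arr.length - 1) (by omega) i j (Nat.zero_le i) hij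
        (by omega) (by rw [hiv, hjv]; ring)
      rw [h, hjv] at hle
      have := hg.1
      omega
    · rw [h5]
      right
      have hjlen : j < arr.length := by omega
      have hpair : GoodPair arr (arr.getD j 0) :=
        (good_iff_pair arr hm (arr.getD j 0)).mpr ⟨i, j, h2, hjlen, by omega, rfl⟩
      refine ⟨(hgood _).mp hpair, fun k hg => ?_⟩
      obtain ⟨i', j', hij', hj', hiv', hjv'⟩ := (good_iff_pair arr hm k).mp ((hgood k).mpr hg)
      have hle := loop_le arr hm 0 (arr.length - 1) (by omega) i' j' (Nat.zero_le i') hij'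
        (by omega) (by rw [hiv', hjv']; ring)
      rw [hjv', h5] at hle
      exact hle

-- ===== VERDICT (by name: the statement is the Claim_ definition above) =====
theorem func_spec : Claim_equal_func := by
  intro nums _
  exact ans_unique nums (func nums) (func_alt nums) (func_ans nums) (func_alt_ans nums)
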